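-- pv_equiv track=rewrite | github.com/iyeque/orca | backend/ai/supplier_suggester.py | suggest_suppliers
-- ===== SOURCE A (Python) =====
-- def suggest_suppliers(product_ids: list, inventory: list):
--     """
--     Suggests suppliers based on the products they supply from the inventory.
--     For a more advanced model, this would involve historical performance, pricing, etc.
--     """
--     eligible_suppliers = set()
--     for product_id in product_ids:
--         for item in inventory:
--             if item.get("product_id") == product_id:
--                 eligible_suppliers.add(item.get("supplier_id"))
--
--     # If no specific suppliers found, return all unique suppliers from inventory
--     if not eligible_suppliers:
--         all_suppliers = set(item.get("supplier_id") for item in inventory if item.get("supplier_id"))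
--         return list(all_suppliers)
--
--     return list(eligible_suppliers)
-- ===== SOURCE B (Python) =====
-- def suggest_suppliers(product_ids: list, inventory: list):
--     # Index inventory once: product_id -> supplier_ids in inventory order,
--     # then walk product_ids over the buckets (no repeated inventory scans).
--     by_product = {}
--     for item in inventory:
--         by_product.setdefault(item.get("product_id"), []).append(item.get("supplier_id"))
--     eligible_suppliers = set()
--     for product_id in product_ids:
--         for supplier_id in by_product.get(product_id, []):
--             eligible_suppliers.add(supplier_id)
--     if not eligible_suppliers:
--         return list({item.get("supplier_id") for item in inventory if item.get("supplier_id")})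
--     return list(eligible_suppliers)
-- ===== Notes on version B (the rewrite author's own statement) =====
-- stated objective: faster
-- what changed: B builds a dict index product_id -> list of supplier_ids in one pass over inventory and then walks product_ids over the buckets, instead of A's rescan of the whole inventory for every product_id; the fallback becomes a set comprehension.
-- outside the precondition, e.g. on suggest_suppliers([1], [{'product_id': 1}]): A returns [None], B returns [None]
import Mathlib
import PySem

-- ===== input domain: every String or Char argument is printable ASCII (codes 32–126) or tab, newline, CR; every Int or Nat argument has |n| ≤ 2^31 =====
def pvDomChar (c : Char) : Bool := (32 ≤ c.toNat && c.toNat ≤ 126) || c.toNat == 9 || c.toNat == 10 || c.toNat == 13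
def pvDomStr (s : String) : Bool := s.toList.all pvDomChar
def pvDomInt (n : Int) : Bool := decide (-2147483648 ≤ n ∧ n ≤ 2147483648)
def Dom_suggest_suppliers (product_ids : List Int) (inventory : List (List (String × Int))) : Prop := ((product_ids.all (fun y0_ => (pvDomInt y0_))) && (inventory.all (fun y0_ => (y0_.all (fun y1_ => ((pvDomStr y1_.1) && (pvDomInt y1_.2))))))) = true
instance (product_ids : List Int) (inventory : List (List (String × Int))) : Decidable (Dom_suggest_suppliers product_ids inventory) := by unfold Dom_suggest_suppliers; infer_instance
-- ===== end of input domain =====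

-- B replaces A's rescan of the whole inventory per product_id by a dict index
-- product_id -> supplier_ids built in one pass (objective: faster, O(P+N) vs O(P*N)).
-- Pre_ excludes inputs on which A returns a list containing None (not an Int).

-- ===== PORT A =====
-- Under Pre_ a matching item always has "supplier_id", so item.get("supplier_id")
-- is ported as getD … 0 (exact inside Pre_; Python would add None otherwise).
def suggest_suppliers (product_ids : List Int) (inventory : List (List (String × Int))) : List Int :=
  let eligible : PySem.Set Int :=
    product_ids.foldl (fun s product_id =>
      inventory.foldl (fun s item =>
        if PySem.Dict.get? (PySem.Dict.mk item) "product_id" == some product_id then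
          PySem.Set.add s (PySem.Dict.getD (PySem.Dict.mk item) "supplier_id" 0)
        else s) s) PySem.Set.empty
  if eligible = [] then
    inventory.foldl (fun s item =>
      match PySem.Dict.get? (PySem.Dict.mk item) "supplier_id" with
      | some v => if v ≠ 0 then PySem.Set.add s v else s
      | none => s) PySem.Set.empty
  else eligible

-- ===== PORT B =====
def suggest_suppliers_alt (product_ids : List Int) (inventory : List (List (String × Int))) : List Int :=
  let by_product : PySem.Dict (Option Int) (List Int) :=
    inventory.foldl (fun d item =>
      d.modify (PySem.Dict.get? (PySem.Dict.mk item) "product_id") []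
        (fun l => l ++ [PySem.Dict.getD (PySem.Dict.mk item) "supplier_id" 0])) PySem.Dict.empty
  let eligible : PySem.Set Int :=
    product_ids.foldl (fun s product_id =>
      (by_product.getD (some product_id) []).foldl PySem.Set.add s) PySem.Set.empty
  if eligible = [] then
    PySem.Set.ofList (inventory.filterMap (fun item =>
      (PySem.Dict.get? (PySem.Dict.mk item) "supplier_id").filter (fun v => v ≠ 0)))
  else eligible

-- ===== PRECONDITION & SPEC =====
-- Pre_ excludes inputs where some inventory item matches a requested product_id but has
-- no "supplier_id" key: there Python A returns a list containing None, not an int.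
def Pre_suggest_suppliers (product_ids : List Int) (inventory : List (List (String × Int))) : Prop :=
  ∀ item ∈ inventory,
    (∃ p ∈ product_ids, PySem.Dict.get? (PySem.Dict.mk item) "product_id" = some p) →
    (PySem.Dict.get? (PySem.Dict.mk item) "supplier_id").isSome = true
instance (product_ids : List Int) (inventory : List (List (String × Int))) : Decidable (Pre_suggest_suppliers product_ids inventory) := by unfold Pre_suggest_suppliers; infer_instance
def pvWitness_suggest_suppliers : List Int × (List (List (String × Int))) :=
  ([1, 2], [[("product_id", 1), ("supplier_id", 5)], [("product_id", 3)]])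
def Spec_suggest_suppliers (product_ids : List Int) (inventory : List (List (String × Int))) (out : List Int) : Prop := out = suggest_suppliers_alt product_ids inventory
instance (product_ids : List Int) (inventory : List (List (String × Int))) (out : List Int) : Decidable (Spec_suggest_suppliers product_ids inventory out) := by unfold Spec_suggest_suppliers; infer_instance

-- ===== CLAIM (what is proved, stated in full; the proofs are below) =====
def Claim_equal_suggest_suppliers : Prop := ∀ (product_ids : List Int) (inventory : List (List (String × Int))), Dom_suggest_suppliers product_ids inventory → Pre_suggest_suppliers product_ids inventory → Spec_suggest_suppliers product_ids inventory (suggest_suppliers product_ids inventory)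

-- ===== LEMMAS AND PROOFS =====

-- A's guarded inner loop is the fold of Set.add over the matching items' suppliers.
theorem foldl_if_add_eq_filter_map {α : Type} (l : List α) (p : α → Bool) (f : α → Int) :
    ∀ s : PySem.Set Int,
      l.foldl (fun s x => if p x then PySem.Set.add s (f x) else s) s
        = ((l.filter p).map f).foldl PySem.Set.add s := by
  induction l with
  | nil => intro s; rfl
  | cons a t ih =>
      intro s
      by_cases h : p a = true <;> simp [h, ih]

-- B's bucket for key (some pid) is exactly the matching items' suppliers, in order.
theorem bucket_eq (inventory : List (List (String × Int))) (pid : Int) :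
    (inventory.foldl (fun d item =>
        PySem.Dict.modify d (PySem.Dict.get? (PySem.Dict.mk item) "product_id") []
          (fun l => l ++ [PySem.Dict.getD (PySem.Dict.mk item) "supplier_id" 0]))
        PySem.Dict.empty).getD (some pid) []
      = ((inventory.filter (fun item =>
            PySem.Dict.get? (PySem.Dict.mk item) "product_id" == some pid)).map
          (fun item => PySem.Dict.getD (PySem.Dict.mk item) "supplier_id" 0)) := by
  have h := PySem.Dict.getD_foldl_modify_append
    (inventory.map (fun item =>
      (PySem.Dict.get? (PySem.Dict.mk item) "product_id",
       PySem.Dict.getD (PySem.Dict.mk item) "supplier_id" 0)))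
    (PySem.Dict.empty) (some pid)
  simpa [List.foldl_map, List.filter_map, List.map_map, Function.comp] using h

-- A fold that adds the some-values of g is the fold of Set.add over filterMap g.
theorem foldl_optadd {α : Type} (g : α → Option Int) (l : List α) :
    ∀ s : PySem.Set Int,
      l.foldl (fun s x => match g x with | some v => PySem.Set.add s v | none => s) s
        = (l.filterMap g).foldl PySem.Set.add s := by
  induction l with
  | nil => intro s; rfl
  | cons a t ih => intro s; cases h : g a <;> simp [h, ih]

-- A's fallback step, item by item, is the optadd step for the truthy filter.
theorem fallback_step (s : PySem.Set Int) (item : List (String × Int)) :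
    (match PySem.Dict.get? (PySem.Dict.mk item) "supplier_id" with
      | some v => if v ≠ 0 then PySem.Set.add s v else s
      | none => s)
    = (match (PySem.Dict.get? (PySem.Dict.mk item) "supplier_id").filter (fun v => v ≠ 0) with
      | some v => PySem.Set.add s v
      | none => s) := by
  cases h : PySem.Dict.get? (PySem.Dict.mk item) "supplier_id" with
  | none => simp [Option.filter]
  | some v => by_cases hv : v = 0 <;> simp [Option.filter, hv]

-- ===== VERDICT (by name: the statement is the Claim_ definition above) =====
theorem suggest_suppliers_spec : Claim_equal_suggest_suppliers := by
  intro product_ids inventory _ _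
  unfold Spec_suggest_suppliers suggest_suppliers suggest_suppliers_alt
  have helig :
      product_ids.foldl (fun s product_id =>
        inventory.foldl (fun s item =>
          if PySem.Dict.get? (PySem.Dict.mk item) "product_id" == some product_id then
            PySem.Set.add s (PySem.Dict.getD (PySem.Dict.mk item) "supplier_id" 0)
          else s) s) PySem.Set.empty
      = product_ids.foldl (fun s product_id =>
          ((inventory.foldl (fun d item =>
              PySem.Dict.modify d (PySem.Dict.get? (PySem.Dict.mk item) "product_id") []
                (fun l => l ++ [PySem.Dict.getD (PySem.Dict.mk item) "supplier_id" 0]))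
              PySem.Dict.empty).getD (some product_id) []).foldl PySem.Set.add s)
          PySem.Set.empty := by
    apply List.foldl_ext
    intro s product_id hmem
    rw [bucket_eq, foldl_if_add_eq_filter_map]
  have hfall :
      inventory.foldl (fun s item =>
        match PySem.Dict.get? (PySem.Dict.mk item) "supplier_id" with
        | some v => if v ≠ 0 then PySem.Set.add s v else s
        | none => s) PySem.Set.empty
      = PySem.Set.ofList (inventory.filterMap (fun item =>
          (PySem.Dict.get? (PySem.Dict.mk item) "supplier_id").filter (fun v => v ≠ 0))) := by
    rw [PySem.Set.ofList_eq_foldl, ← foldl_optadd]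
    apply List.foldl_ext
    intro s item _
    exact fallback_step s item
  simp only [helig, hfall]
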